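-- pv_equiv track=rewrite | github.com/EdoardoCiato/TennisAnalyticsV3 | AggV2.py | select_rally_table
-- ===== SOURCE A (Python) =====
-- def select_rally_table(table_names: list[str]) -> str | None:
--     if not table_names:
--         return None
--
--     preferred = [name for name in table_names if "RallyAll_matchesGlossary" in name]
--     if preferred:
--         return sorted(preferred, key=len, reverse=True)[0]
--
--     preferred = [name for name in table_names if "RallyGlossary" in name]
--     if preferred:
--         return sorted(preferred, key=len, reverse=True)[0]
--
--     return sorted(table_names, key=len, reverse=True)[0]
-- ===== SOURCE B (Python) =====
-- def select_rally_table(table_names: list[str]) -> str | None: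
--     # Single pass: rank each name (2 = RallyAll_matchesGlossary, 1 = RallyGlossary,
--     # 0 = other) and keep the first name with the lexicographically largest
--     # (rank, length) key; no filtering passes, no sort.
--     best = None  # ((rank, length), name)
--     for name in table_names:
--         if "RallyAll_matchesGlossary" in name:
--             rank = 2
--         elif "RallyGlossary" in name:
--             rank = 1
--         else:
--             rank = 0
--         key = (rank, len(name))
--         if best is None or best[0] < key:
--             best = (key, name)
--     return None if best is None else best[1]
-- ===== Notes on version B (the rewrite author's own statement) =====
-- stated objective: alternative
-- what changed: Instead of A's three staged filter-then-sort-descending passes, B makes one pass with an accumulator: each name gets a rank (2 for 'RallyAll_matchesGlossary', 1 for 'RallyGlossary', 0 otherwise) and B keeps the first name whose lexicographic (rank, length) key is largest, so no intermediate lists and no sort.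
import Mathlib
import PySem

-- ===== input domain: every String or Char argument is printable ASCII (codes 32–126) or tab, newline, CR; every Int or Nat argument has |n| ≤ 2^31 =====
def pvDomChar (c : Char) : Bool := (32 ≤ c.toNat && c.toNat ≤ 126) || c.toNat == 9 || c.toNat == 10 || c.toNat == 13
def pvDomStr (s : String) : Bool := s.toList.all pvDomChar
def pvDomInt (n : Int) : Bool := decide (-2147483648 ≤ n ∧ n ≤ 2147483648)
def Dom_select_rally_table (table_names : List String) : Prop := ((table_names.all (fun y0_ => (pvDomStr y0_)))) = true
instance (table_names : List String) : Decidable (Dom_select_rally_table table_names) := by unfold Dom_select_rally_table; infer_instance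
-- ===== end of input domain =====

-- B replaces A's three filter + sort-descending + take-first passes by ONE pass that ranks
-- each name (2/1/0 by preferred substring) and keeps the first name with the largest
-- lexicographic (rank, length) key: a different algorithm — one accumulator loop, no list building, no sort.

-- ===== PORT A =====
def select_rally_table (table_names : List String) : Option String :=
  if table_names = [] then none
  else
    let preferred1 := table_names.filter (fun name => PySem.Str.isIn "RallyAll_matchesGlossary" name)
    if preferred1 ≠ [] then
      PySem.List.pyGet? (PySem.List.sorted preferred1 (fun n => PySem.Str.len n) true) 0
    else
      let preferred2 := table_names.filter (fun name => PySem.Str.isIn "RallyGlossary" name)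
      if preferred2 ≠ [] then
        PySem.List.pyGet? (PySem.List.sorted preferred2 (fun n => PySem.Str.len n) true) 0
      else
        PySem.List.pyGet? (PySem.List.sorted table_names (fun n => PySem.Str.len n) true) 0

-- ===== PORT B =====
-- single-pass loop of Source B: best = ((rank, length), name) accumulator; tuple `<` is lexicographic
def select_rally_table_alt (table_names : List String) : Option String :=
  let best :=
    table_names.foldl (fun best name =>
      let rank : Int :=
        if PySem.Str.isIn "RallyAll_matchesGlossary" name then 2
        else if PySem.Str.isIn "RallyGlossary" name then 1
        else 0
      let key : Int × Int := (rank, PySem.Str.len name)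
      match best with
      | none => some (key, name)
      | some (k0, n0) =>
        if k0.1 < key.1 ∨ (k0.1 = key.1 ∧ k0.2 < key.2) then some (key, name)
        else some (k0, n0)) none
  match best with
  | none => none
  | some (_, name) => some name

-- ===== PRECONDITION & SPEC =====
def Spec_select_rally_table (table_names : List String) (out : Option String) : Prop := out = select_rally_table_alt table_names
instance (table_names : List String) (out : Option String) : Decidable (Spec_select_rally_table table_names out) := by unfold Spec_select_rally_table; infer_instance

-- ===== CLAIM (what is proved, stated in full; the proofs are below) =====
def Claim_equal_select_rally_table : Prop := ∀ (table_names : List String), Dom_select_rally_table table_names → Spec_select_rally_table table_names (select_rally_table table_names)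

-- ===== LEMMAS AND PROOFS =====

-- the generic "running first-maximum" step (= the body of max(..., key=...) as a fold)
def pvMStep {α κ : Type} [LinearOrder κ] (key : α → κ) (m : Option α) (x : α) : Option α :=
  match m with
  | none => some x
  | some m => if key m < key x then some x else some m

-- A's rank of a name, and the lexicographic (rank, length) key B maximises
def pvRank (n : String) : Int :=
  if PySem.Str.isIn "RallyAll_matchesGlossary" n then 2
  else if PySem.Str.isIn "RallyGlossary" n then 1
  else 0

def pvKey (n : String) : Int ×ₗ Int := toLex (pvRank n, PySem.Str.len n)

-- head of a reverse-stable insertion step = one running-max step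
theorem head?_insertBy_rev {α κ : Type} [LinearOrder κ] (key : α → κ) (x : α) (acc : List α) :
    (PySem.List.insertBy (fun a b => decide (key b < key a)) x acc).head? =
      pvMStep key acc.head? x := by
  cases acc with
  | nil => simp [PySem.List.insertBy, pvMStep]
  | cons y ys =>
    by_cases h : key y < key x <;> simp [PySem.List.insertBy, pvMStep, h]

theorem head?_foldl_insertBy_rev {α κ : Type} [LinearOrder κ] (key : α → κ) (xs : List α) (acc : List α) :
    (xs.foldl (fun acc x => PySem.List.insertBy (fun a b => decide (key b < key a)) x acc) acc).head? =
      xs.foldl (pvMStep key) acc.head? := by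
  induction xs generalizing acc with
  | nil => rfl
  | cons x t ih =>
    simp only [List.foldl_cons, ih, head?_insertBy_rev]

theorem pyGet?_zero_eq_head? {α : Type} (xs : List α) :
    PySem.List.pyGet? xs 0 = xs.head? := by
  cases xs <;> simp [PySem.List.pyGet?, PySem.List.pyIdx?, List.head?]

-- head of the reverse-length-sorted list IS the running first-max fold
theorem head_sorted_rev_eq_mfold {α κ : Type} [LinearOrder κ] (xs : List α) (key : α → κ) :
    PySem.List.pyGet? (PySem.List.sorted xs key true) 0 = xs.foldl (pvMStep key) none := by
  rw [pyGet?_zero_eq_head?, PySem.List.sorted_rev_eq_foldl_insertBy]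
  exact head?_foldl_insertBy_rev key xs []

-- with a good (p-true) accumulator, bad elements never win: the fold ignores them
theorem mfold_good_acc {α κ : Type} [LinearOrder κ] (key : α → κ) (p : α → Bool) (l : List α)
    (H : ∀ a ∈ l, ∀ b ∈ l, p a = false → p b = true → key a < key b) :
    ∀ (xs : List α), xs ⊆ l → ∀ (m : α), m ∈ l → p m = true →
      xs.foldl (pvMStep key) (some m) = (xs.filter p).foldl (pvMStep key) (some m) := by
  intro xs
  induction xs with
  | nil => intro _ m _ _; rfl
  | cons x t ih =>
    intro hsub m hm hpm
    have hx : x ∈ l := hsub (List.mem_cons_self ..)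
    have ht : t ⊆ l := fun a ha => hsub (List.mem_cons_of_mem _ ha)
    by_cases hpx : p x = true
    · simp only [List.filter_cons, hpx, if_pos, List.foldl_cons]
      show (t.foldl (pvMStep key) (pvMStep key (some m) x)) = _
      by_cases hlt : key m < key x
      · simp only [pvMStep, if_pos hlt]; exact ih ht x hx hpx
      · simp only [pvMStep, if_neg hlt]; exact ih ht m hm hpm
    · have hpx' : p x = false := by simp_all
      have hxm : key x < key m := H x hx m hm hpx' hpm
      have hnlt : ¬ key m < key x := lt_asymm hxm
      simp only [List.filter_cons, hpx', Bool.false_eq_true, List.foldl_cons]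
      show (t.foldl (pvMStep key) (pvMStep key (some m) x)) = _
      simp only [pvMStep, if_neg hnlt]
      exact ih ht m hm hpm

-- from a bad-or-empty accumulator, the fold over xs equals the fold over its p-filter (if nonempty)
theorem mfold_filter {α κ : Type} [LinearOrder κ] (key : α → κ) (p : α → Bool) (l : List α)
    (H : ∀ a ∈ l, ∀ b ∈ l, p a = false → p b = true → key a < key b) :
    ∀ (xs : List α), xs ⊆ l → ∀ (acc : Option α),
      (acc = none ∨ ∃ m ∈ l, acc = some m ∧ p m = false) → xs.filter p ≠ [] →
      xs.foldl (pvMStep key) acc = (xs.filter p).foldl (pvMStep key) none := by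
  intro xs
  induction xs with
  | nil => intro _ _ _ hne; simp at hne
  | cons x t ih =>
    intro hsub acc hacc hne
    have hx : x ∈ l := hsub (List.mem_cons_self ..)
    have ht : t ⊆ l := fun a ha => hsub (List.mem_cons_of_mem _ ha)
    by_cases hpx : p x = true
    · -- x is good: both folds continue from (some x)
      have hstep : pvMStep key acc x = some x := by
        rcases hacc with h | ⟨m, hm, rfl, hpm⟩
        · simp [h, pvMStep]
        · have : key m < key x := H m hm x hx hpm hpx
          simp [pvMStep, this]
      simp only [List.filter_cons, hpx, if_pos, List.foldl_cons, hstep]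
      have h2 : pvMStep key none x = some x := rfl
      rw [h2]
      exact mfold_good_acc key p l H t ht x hx hpx
    · -- x is bad: it is dropped by the filter and the accumulator stays bad
      have hpx' : p x = false := by simp_all
      have hne' : t.filter p ≠ [] := by
        simpa [List.filter_cons, hpx'] using hne
      have hacc' : pvMStep key acc x = none ∨
          ∃ m ∈ l, pvMStep key acc x = some m ∧ p m = false := by
        rcases hacc with h | ⟨m, hm, rfl, hpm⟩
        · exact Or.inr ⟨x, hx, by simp [h, pvMStep], hpx'⟩
        · by_cases hlt : key m < key x
          · exact Or.inr ⟨x, hx, by simp [pvMStep, hlt], hpx'⟩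
          · exact Or.inr ⟨m, hm, by simp [pvMStep, hlt], hpm⟩
      simp only [List.filter_cons, hpx', Bool.false_eq_true, List.foldl_cons]
      exact ih ht _ hacc' hne'
-- on elements where two keys induce the same strict order, the folds agree
theorem mfold_congr {α κ₁ κ₂ : Type} [LinearOrder κ₁] [LinearOrder κ₂]
    (key₁ : α → κ₁) (key₂ : α → κ₂) (l : List α)
    (H : ∀ a ∈ l, ∀ b ∈ l, (key₁ a < key₁ b ↔ key₂ a < key₂ b)) :
    ∀ (xs : List α), xs ⊆ l → ∀ (acc : Option α), (∀ m, acc = some m → m ∈ l) →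
      xs.foldl (pvMStep key₁) acc = xs.foldl (pvMStep key₂) acc := by
  intro xs
  induction xs with
  | nil => intro _ _ _; rfl
  | cons x t ih =>
    intro hsub acc hacc
    have hx : x ∈ l := hsub (List.mem_cons_self ..)
    have ht : t ⊆ l := fun a ha => hsub (List.mem_cons_of_mem _ ha)
    simp only [List.foldl_cons]
    have hstep : pvMStep key₁ acc x = pvMStep key₂ acc x := by
      cases acc with
      | none => rfl
      | some m =>
        have hm : m ∈ l := hacc m rfl
        simp only [pvMStep]
        by_cases hlt : key₁ m < key₁ x
        · rw [if_pos hlt, if_pos ((H m hm x hx).mp hlt)]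
        · rw [if_neg hlt, if_neg (fun h => hlt ((H m hm x hx).mpr h))]
    rw [hstep]
    refine ih ht _ (fun m hm => ?_)
    cases acc with
    | none =>
      simp only [pvMStep] at hm
      injection hm with h; exact h ▸ hx
    | some m0 =>
      have hm0 : m0 ∈ l := hacc m0 rfl
      simp only [pvMStep] at hm
      split at hm <;> (injection hm with h)
      · exact h ▸ hx
      · exact h ▸ hm0

-- B's loop body, named (definitionally equal to the lambda in the port)
def pvBStep (best : Option ((Int × Int) × String)) (name : String) : Option ((Int × Int) × String) :=
  match best with
  | none => some ((pvRank name, PySem.Str.len name), name)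
  | some (k0, n0) =>
    if k0.1 < pvRank name ∨ (k0.1 = pvRank name ∧ k0.2 < PySem.Str.len name) then
      some ((pvRank name, PySem.Str.len name), name)
    else some (k0, n0)

-- B's literal fold (carrying ((rank,len), name)) projects to the pvKey running-max fold
theorem bfold_eq_mfold (xs : List String) :
    ∀ (m : Option String),
      xs.foldl pvBStep (m.map (fun n => ((pvRank n, PySem.Str.len n), n))) =
      (xs.foldl (pvMStep pvKey) m).map (fun n => ((pvRank n, PySem.Str.len n), n)) := by
  induction xs with
  | nil => intro m; rfl
  | cons x t ih =>
    intro m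
    simp only [List.foldl_cons]
    cases m with
    | none =>
      have h1 := ih (some x)
      simp only [Option.map_some] at h1 ⊢
      simpa [pvBStep, pvMStep] using h1
    | some n =>
      have hcond : ((pvRank n, PySem.Str.len n).1 < pvRank x ∨
          ((pvRank n, PySem.Str.len n).1 = pvRank x ∧
           (pvRank n, PySem.Str.len n).2 < PySem.Str.len x)) ↔ pvKey n < pvKey x := by
        simp [pvKey, Prod.Lex.lt_iff]
      by_cases hlt : pvKey n < pvKey x
      · have h1 := ih (some x)
        simp only [Option.map_some] at h1 ⊢
        rw [show pvBStep (some ((pvRank n, PySem.Str.len n), n)) x =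
            some ((pvRank x, PySem.Str.len x), x) by
          simp only [pvBStep]; rw [if_pos (hcond.mpr hlt)]]
        rw [show pvMStep pvKey (some n) x = some x by
          simp only [pvMStep]; rw [if_pos hlt]]
        exact h1
      · have h1 := ih (some n)
        simp only [Option.map_some] at h1 ⊢
        rw [show pvBStep (some ((pvRank n, PySem.Str.len n), n)) x =
            some ((pvRank n, PySem.Str.len n), n) by
          simp only [pvBStep]; rw [if_neg (fun h => hlt (hcond.mp h))]]
        rw [show pvMStep pvKey (some n) x = some n by
          simp only [pvMStep]; rw [if_neg hlt]]
        exact h1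

-- rank facts
theorem pvRank_of_big {n : String} (h : PySem.Str.isIn "RallyAll_matchesGlossary" n = true) :
    pvRank n = 2 := by unfold pvRank; rw [if_pos h]
theorem pvRank_of_small {n : String} (hb : PySem.Str.isIn "RallyAll_matchesGlossary" n = false)
    (h : PySem.Str.isIn "RallyGlossary" n = true) : pvRank n = 1 := by
  unfold pvRank; rw [if_neg (fun hc => by simp_all), if_pos h]
theorem pvRank_of_none {n : String} (hb : PySem.Str.isIn "RallyAll_matchesGlossary" n = false)
    (h : PySem.Str.isIn "RallyGlossary" n = false) : pvRank n = 0 := by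
  unfold pvRank; rw [if_neg (fun hc => by simp_all), if_neg (fun hc => by simp_all)]
theorem pvRank_le_one {n : String} (hb : PySem.Str.isIn "RallyAll_matchesGlossary" n = false) :
    pvRank n ≤ 1 := by
  unfold pvRank; rw [if_neg (fun hc => by simp_all)]; split_ifs <;> omega

theorem pvKey_lt_of_rank_lt {a b : String} (h : pvRank a < pvRank b) : pvKey a < pvKey b := by
  simp only [pvKey, Prod.Lex.lt_iff, ofLex_toLex]; omega
theorem pvKey_lt_iff_len_of_rank_eq {a b : String} (h : pvRank a = pvRank b) :
    (PySem.Str.len a < PySem.Str.len b ↔ pvKey a < pvKey b) := by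
  simp only [pvKey, Prod.Lex.lt_iff, ofLex_toLex]; omega

-- B's port equals the running-max fold with the lexicographic key
theorem alt_eq_mfold (xs : List String) :
    select_rally_table_alt xs = xs.foldl (pvMStep pvKey) none := by
  show (match xs.foldl pvBStep none with
        | none => none
        | some (_, name) => some name) = _
  rw [show (none : Option ((Int × Int) × String)) =
      Option.map (fun n => ((pvRank n, PySem.Str.len n), n)) none from rfl,
    bfold_eq_mfold]
  cases xs.foldl (pvMStep pvKey) none <;> rfl

-- ===== VERDICT (by name: the statement is the Claim_ definition above) =====
theorem select_rally_table_spec : Claim_equal_select_rally_table := by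
  intro xs _
  unfold Spec_select_rally_table select_rally_table
  rw [alt_eq_mfold]
  by_cases h0 : xs = []
  · simp [h0]
  · simp only [if_neg h0]
    by_cases h1 : xs.filter (fun name => PySem.Str.isIn "RallyAll_matchesGlossary" name) ≠ []
    · -- stage 1: some name contains the long substring (rank 2)
      have hstep1 : xs.foldl (pvMStep pvKey) none =
          (xs.filter (fun name => PySem.Str.isIn "RallyAll_matchesGlossary" name)).foldl
            (pvMStep pvKey) none :=
        mfold_filter pvKey _ xs
          (fun a _ b _ hpa hpb => pvKey_lt_of_rank_lt (by
            have h2a := pvRank_le_one (n := a) hpa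
            have h2b := pvRank_of_big (n := b) hpb
            omega))
          xs (fun _ h => h) none (Or.inl rfl) h1
      have hcongr : (xs.filter (fun name => PySem.Str.isIn "RallyAll_matchesGlossary" name)).foldl
            (pvMStep (fun n => PySem.Str.len n)) none =
          (xs.filter (fun name => PySem.Str.isIn "RallyAll_matchesGlossary" name)).foldl
            (pvMStep pvKey) none := by
        refine mfold_congr (fun n => PySem.Str.len n) pvKey _ (fun a ha b hb => ?_) _
          (fun _ h => h) none (by simp)
        have hra := pvRank_of_big (n := a) (List.of_mem_filter ha)
        have hrb := pvRank_of_big (n := b) (List.of_mem_filter hb)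
        exact pvKey_lt_iff_len_of_rank_eq (by omega)
      rw [if_pos h1, head_sorted_rev_eq_mfold, hcongr, ← hstep1]
    · -- no rank-2 name anywhere
      have hall2 : ∀ a ∈ xs, PySem.Str.isIn "RallyAll_matchesGlossary" a = false := by
        intro a ha
        by_contra hc
        exact h1 (List.ne_nil_of_mem (List.mem_filter_of_mem ha (by simpa using hc)))
      rw [if_neg h1]
      by_cases h2 : xs.filter (fun name => PySem.Str.isIn "RallyGlossary" name) ≠ []
      · -- stage 2: some name contains "RallyGlossary" (rank 1), none rank 2
        have hstep2 : xs.foldl (pvMStep pvKey) none =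
            (xs.filter (fun name => PySem.Str.isIn "RallyGlossary" name)).foldl
              (pvMStep pvKey) none :=
          mfold_filter pvKey _ xs
            (fun a ha b hb hpa hpb => pvKey_lt_of_rank_lt (by
              have h0a := pvRank_of_none (n := a) (hall2 a ha) hpa
              have h1b := pvRank_of_small (n := b) (hall2 b hb) hpb
              omega))
            xs (fun _ h => h) none (Or.inl rfl) h2
        have hcongr : (xs.filter (fun name => PySem.Str.isIn "RallyGlossary" name)).foldl
              (pvMStep (fun n => PySem.Str.len n)) none =
            (xs.filter (fun name => PySem.Str.isIn "RallyGlossary" name)).foldl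
              (pvMStep pvKey) none := by
          refine mfold_congr (fun n => PySem.Str.len n) pvKey _ (fun a ha b hb => ?_) _
            (fun _ h => h) none (by simp)
          have hra := pvRank_of_small (n := a) (hall2 a (List.mem_of_mem_filter ha))
            (List.of_mem_filter ha)
          have hrb := pvRank_of_small (n := b) (hall2 b (List.mem_of_mem_filter hb))
            (List.of_mem_filter hb)
          exact pvKey_lt_iff_len_of_rank_eq (by omega)
        rw [if_pos h2, head_sorted_rev_eq_mfold, hcongr, ← hstep2]
      · -- stage 3: every name has rank 0
        have hall1 : ∀ a ∈ xs, PySem.Str.isIn "RallyGlossary" a = false := by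
          intro a ha
          by_contra hc
          exact h2 (List.ne_nil_of_mem (List.mem_filter_of_mem ha (by simpa using hc)))
        rw [if_neg h2, head_sorted_rev_eq_mfold]
        refine mfold_congr (fun n => PySem.Str.len n) pvKey xs (fun a ha b hb => ?_) xs
          (fun _ h => h) none (by simp)
        have hra := pvRank_of_none (n := a) (hall2 a ha) (hall1 a ha)
        have hrb := pvRank_of_none (n := b) (hall2 b hb) (hall1 b hb)
        exact pvKey_lt_iff_len_of_rank_eq (by omega)
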